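-- pv_equiv track=rewrite | github.com/aibaellord/BaelTheLordOfAll-AI | core/bypass/universal_bypass_protocol.py | _url_encode_bypass
-- ===== SOURCE A (Python) =====
-- def _url_encode_bypass(payload: str) -> str:
--     """URL encode bypass."""
--     result = ""
--     for char in payload:
--         if char.isalpha():
--             result += f"%{ord(char):02X}"
--         else:
--             result += char
--     return result
-- ===== SOURCE B (Python) =====
-- def _url_encode_bypass(payload: str) -> str:
--     """URL encode bypass."""
--     table = {ord(c): f"%{ord(c):02X}" for c in set(payload) if c.isalpha()}
--     return payload.translate(table)
-- ===== Notes on version B (the rewrite author's own statement) =====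
-- stated objective: idiomatic
-- what changed: Replaces the per-character if/else string-concatenation loop with a precomputed translation table (codepoint -> '%XX') built from the payload's distinct characters, delegating the single pass to str.translate.
import Mathlib
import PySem

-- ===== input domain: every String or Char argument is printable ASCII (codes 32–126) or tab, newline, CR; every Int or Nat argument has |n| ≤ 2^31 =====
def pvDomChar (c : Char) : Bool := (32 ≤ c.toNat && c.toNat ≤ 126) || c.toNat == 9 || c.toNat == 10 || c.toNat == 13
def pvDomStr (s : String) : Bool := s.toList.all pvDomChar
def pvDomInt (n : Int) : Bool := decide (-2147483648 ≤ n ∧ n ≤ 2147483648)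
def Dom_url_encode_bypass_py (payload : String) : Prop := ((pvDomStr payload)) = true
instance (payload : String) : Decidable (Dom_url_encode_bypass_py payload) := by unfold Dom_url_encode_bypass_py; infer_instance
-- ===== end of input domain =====

-- B replaces A's per-character if/else concatenation loop with a precomputed
-- codepoint→"%XX" translation table applied in one translate pass (idiomatic).

-- f"%{ord(c):02X}": '%' followed by the two uppercase hex digits of c's codepoint
-- (exact for codepoints 16..255; Dom admits codepoints ≤ 126). Shared f-string helper.
def pvHexDig (n : Nat) : Char := if n < 10 then Char.ofNat (48 + n) else Char.ofNat (55 + n)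
def pvPctHex (c : Char) : String := String.ofList ['%', pvHexDig (c.toNat / 16), pvHexDig (c.toNat % 16)]

-- ===== PORT A =====
def url_encode_bypass_py (payload : String) : String :=
  payload.toList.foldl
    (fun result char =>
      if PySem.Chars.isalpha char then result ++ pvPctHex char
      else result ++ String.singleton char)
    ""

-- ===== PORT B =====
-- table = {ord(c): f"%{ord(c):02X}" for c in set(payload) if c.isalpha()}
def pvTable (payload : String) : PySem.Dict Int String :=
  (PySem.Set.ofList payload.toList).foldl
    (fun d c => if PySem.Chars.isalpha c then d.insert (c.toNat : Int) (pvPctHex c) else d)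
    PySem.Dict.empty

-- payload.translate(table): each char is replaced by table[ord(char)] if present, else kept
def url_encode_bypass_py_alt (payload : String) : String :=
  String.ofList ((payload.toList.map
    (fun c => (((pvTable payload).get? (c.toNat : Int)).map String.toList).getD [c])).flatten)

-- ===== PRECONDITION & SPEC =====
def Spec_url_encode_bypass_py (payload : String) (out : String) : Prop := out = url_encode_bypass_py_alt payload
instance (payload : String) (out : String) : Decidable (Spec_url_encode_bypass_py payload out) := by unfold Spec_url_encode_bypass_py; infer_instance

-- ===== CLAIM (what is proved, stated in full; the proofs are below) =====
def Claim_equal_url_encode_bypass_py : Prop := ∀ (payload : String), Dom_url_encode_bypass_py payload → Spec_url_encode_bypass_py payload (url_encode_bypass_py payload)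

-- ===== LEMMAS AND PROOFS =====

-- Lookup in the folded table: for any c, the table answers pvPctHex c iff c is an
-- alphabetic member of the iterated list (keys ord c are injective in c).
theorem pvKey_ne {c x : Char} (h : c ≠ x) : ((c.toNat : Int) ≠ (x.toNat : Int)) := by
  simp only [ne_eq, Int.natCast_inj]
  intro hh; apply h; rw [← Char.ofNat_toNat c, ← Char.ofNat_toNat x, hh]

-- Lookup in the folded table: the table answers pvPctHex c iff c is an
-- alphabetic member of the iterated list (keys ord c are injective in c).
theorem pvTable_get (l : List Char) (d : PySem.Dict Int String) (c : Char) :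
    (l.foldl (fun d c => if PySem.Chars.isalpha c then d.insert (c.toNat : Int) (pvPctHex c) else d) d).get? (c.toNat : Int)
      = if PySem.Chars.isalpha c ∧ c ∈ l then some (pvPctHex c) else d.get? (c.toNat : Int) := by
  induction l generalizing d with
  | nil => simp
  | cons x l ih =>
    simp only [List.foldl_cons, ih, List.mem_cons]
    by_cases hc : c = x
    · subst hc
      by_cases ha : PySem.Chars.isalpha c
      · by_cases hm : c ∈ l <;> simp [ha, hm, PySem.Dict.get?_insert_self]
      · simp [ha]
    · have hkey : ((c.toNat : Int) ≠ (x.toNat : Int)) := pvKey_ne hc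
      by_cases hax : PySem.Chars.isalpha x
      · by_cases ha : PySem.Chars.isalpha c
        · by_cases hm : c ∈ l <;>
            simp [ha, hm, hc, hax, PySem.Dict.get?_insert_of_ne _ _ hkey]
        · simp [ha, hax, PySem.Dict.get?_insert_of_ne _ _ hkey]
      · by_cases ha : PySem.Chars.isalpha c
        · by_cases hm : c ∈ l <;> simp [ha, hm, hc, hax]
        · simp [ha, hax]

-- the per-character piece B emits
theorem pv_alt_piece (payload : String) (c : Char) (hc : c ∈ payload.toList) :
    ((((pvTable payload).get? (c.toNat : Int)).map String.toList).getD [c])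
      = if PySem.Chars.isalpha c then (pvPctHex c).toList else [c] := by
  unfold pvTable
  rw [pvTable_get]
  by_cases ha : PySem.Chars.isalpha c
  · simp [ha, hc, PySem.Set.mem_ofList]
  · simp [ha, PySem.Dict.empty, PySem.Dict.get?]

-- A's accumulator loop, characterised as flattened per-character pieces
theorem pvA_foldl (l : List Char) (acc : String) :
    (l.foldl (fun result char =>
        if PySem.Chars.isalpha char then result ++ pvPctHex char
        else result ++ String.singleton char) acc).toList
      = acc.toList ++ (l.map (fun c => if PySem.Chars.isalpha c then (pvPctHex c).toList else [c])).flatten := by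
  induction l generalizing acc with
  | nil => simp
  | cons x l ih =>
    rw [List.foldl_cons, ih]
    by_cases ha : PySem.Chars.isalpha x <;>
      simp [ha, String.singleton]

-- ===== VERDICT (by name: the statement is the Claim_ definition above) =====
theorem url_encode_bypass_py_spec : Claim_equal_url_encode_bypass_py := by
  intro payload _
  unfold Spec_url_encode_bypass_py url_encode_bypass_py url_encode_bypass_py_alt
  apply String.toList_injective
  rw [pvA_foldl]
  simp only [String.toList_ofList, String.toList_empty, List.nil_append]
  exact congrArg List.flatten
    (List.map_congr_left (fun c hc => (pv_alt_piece payload c hc).symm))
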